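-- pv_equiv track=rewrite | github.com/MaiMee1/codebin | python/robotframework/libraries/src/CollectionExtensions/list.py | split_n
-- ===== SOURCE A (Python) =====
-- from typing import Generator, TypeVar
--
-- T = TypeVar("T")
--
-- def split(lst: list[T], sep: T) -> Generator[list[T], None, None]:
--     seg = list()
--     for e in lst:
--         if e == sep:
--             yield seg
--             seg = list()
--         else:
--             seg.append(e)
--     yield seg
--
-- def split_n(lst: list[T], sep: T, n: int) -> Generator[list[T], None, None]:
--     counter = 0
--     for l in split(lst, sep):
--         yield l
--         counter += 1
--         if counter == n:
--             return
--     if n > 0 and counter < n: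
--         for _ in range(n - counter):
--             yield list()
-- ===== SOURCE B (Python) =====
-- def split_n(lst, sep, n):
--     # B: repeatedly locate the next separator with list.index and slice the
--     # segment off, instead of streaming elements through a buffer generator;
--     # then truncate/pad the finished segment list in one step.
--     segs = []
--     rest = lst
--     while sep in rest:
--         i = rest.index(sep)
--         segs.append(rest[:i])
--         rest = rest[i + 1:]
--     segs.append(rest)
--     if n <= 0:
--         yield from segs
--     else:
--         yield from segs[:n]
--         for _ in range(n - len(segs)):
--             yield []
-- ===== Notes on version B (the rewrite author's own statement) =====
-- stated objective: alternative
-- what changed: B replaces A's streaming buffer generator plus counter/early-return with a find-index-and-slice loop (list.index + slicing off each segment) followed by a single truncate/pad step on the finished segment list.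
import Mathlib
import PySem

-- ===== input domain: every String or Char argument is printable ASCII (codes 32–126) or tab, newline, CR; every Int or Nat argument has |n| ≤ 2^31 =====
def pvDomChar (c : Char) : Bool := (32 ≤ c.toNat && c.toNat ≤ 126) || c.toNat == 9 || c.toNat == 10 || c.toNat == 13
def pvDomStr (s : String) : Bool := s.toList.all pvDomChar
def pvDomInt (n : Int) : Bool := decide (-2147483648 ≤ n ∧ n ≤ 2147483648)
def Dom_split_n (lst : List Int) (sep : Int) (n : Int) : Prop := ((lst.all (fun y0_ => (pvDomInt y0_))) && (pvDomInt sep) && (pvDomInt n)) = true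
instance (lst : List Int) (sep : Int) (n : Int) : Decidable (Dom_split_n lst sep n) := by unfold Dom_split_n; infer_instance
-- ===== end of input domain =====

-- B re-implements A by a find-index-and-slice loop plus one truncate/pad step (alternative decomposition, same cost).

-- ===== PORT A =====
-- helper generator `split`: buffer `seg`, flushed on each separator; materialised as the list of yields
def pySplitGo (lst : List Int) (sep : Int) (acc : List (List Int)) (seg : List Int) : List (List Int) :=
  match lst with
  | [] => acc ++ [seg]
  | e :: rest =>
    if e = sep then pySplitGo rest sep (acc ++ [seg]) []
    else pySplitGo rest sep acc (seg ++ [e])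

-- the `for l in split(...)` loop with counter and early return, then the padding loop
-- (`for _ in range(n - counter): yield list()` is exactly (n - counter).toNat empty lists)
def splitNLoop (ls : List (List Int)) (n : Int) (counter : Int) (out : List (List Int)) : List (List Int) :=
  match ls with
  | [] => if n > 0 ∧ counter < n then out ++ List.replicate (n - counter).toNat ([] : List Int) else out
  | l :: rest =>
    let out' := out ++ [l]
    let counter' := counter + 1
    if counter' = n then out' else splitNLoop rest n counter' out'

def split_n (lst : List Int) (sep : Int) (n : Int) : List (List Int) :=
  splitNLoop (pySplitGo lst sep [] []) n 0 []

-- ===== PORT B =====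
-- the `while sep in rest: i = rest.index(sep); segs.append(rest[:i]); rest = rest[i+1:]` loop
def splitAllB (rest : List Int) (sep : Int) (segs : List (List Int)) : List (List Int) :=
  match h : PySem.List.index? rest sep with
  | none => segs ++ [rest]
  | some i =>
    splitAllB (PySem.List.slice rest (some ((i : Int) + 1)) none) sep
      (segs ++ [PySem.List.slice rest none (some (i : Int))])
termination_by rest.length
decreasing_by
  obtain ⟨hk, -, -⟩ := PySem.List.getElem_of_index?_eq_some h
  have hc : ((i : Int) + 1) = (((i + 1 : Nat)) : Int) := by push_cast; ring
  rw [hc, PySem.List.slice_from_natCast, List.length_drop]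
  omega

-- `if n <= 0: yield from segs` else `yield from segs[:n]` plus the padding loop
def split_n_alt (lst : List Int) (sep : Int) (n : Int) : List (List Int) :=
  let segs := splitAllB lst sep []
  if n ≤ 0 then segs
  else PySem.List.slice segs none (some n) ++ List.replicate (n - segs.length).toNat ([] : List Int)

-- ===== PRECONDITION & SPEC =====
def Spec_split_n (lst : List Int) (sep : Int) (n : Int) (out : List (List Int)) : Prop := out = split_n_alt lst sep n
instance (lst : List Int) (sep : Int) (n : Int) (out : List (List Int)) : Decidable (Spec_split_n lst sep n out) := by unfold Spec_split_n; infer_instance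

-- ===== CLAIM (what is proved, stated in full; the proofs are below) =====
def Claim_equal_split_n : Prop := ∀ (lst : List Int) (sep : Int) (n : Int), Dom_split_n lst sep n → Spec_split_n lst sep n (split_n lst sep n)

-- ===== LEMMAS AND PROOFS =====

-- reference recursion both ports are reduced to
def specSplit (lst : List Int) (sep : Int) : List (List Int) :=
  match lst with
  | [] => [[]]
  | e :: rest => if e = sep then [] :: specSplit rest sep else (specSplit rest sep).modifyHead (e :: ·)

theorem specSplit_ne_nil (lst : List Int) (sep : Int) : specSplit lst sep ≠ [] := by
  induction lst with
  | nil => simp [specSplit]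
  | cons e rest ih =>
    simp only [specSplit]
    split_ifs
    · simp
    · cases h : specSplit rest sep with
      | nil => exact absurd h ih
      | cons a t => simp

theorem pySplitGo_eq (lst : List Int) (sep : Int) (acc : List (List Int)) (seg : List Int) :
    pySplitGo lst sep acc seg = acc ++ (specSplit lst sep).modifyHead (seg ++ ·) := by
  induction lst generalizing acc seg with
  | nil => simp [pySplitGo, specSplit]
  | cons e rest ih =>
    simp only [pySplitGo, specSplit]
    split_ifs with he
    · rw [ih]
      cases h : specSplit rest sep with
      | nil => exact absurd h (specSplit_ne_nil rest sep)
      | cons a t => simp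
    · rw [ih]
      cases h : specSplit rest sep with
      | nil => exact absurd h (specSplit_ne_nil rest sep)
      | cons a t => simp

theorem specSplit_not_mem (lst : List Int) (sep : Int) (h : sep ∉ lst) :
    specSplit lst sep = [lst] := by
  induction lst with
  | nil => simp [specSplit]
  | cons e rest ih =>
    simp only [List.mem_cons, not_or] at h
    simp [specSplit, Ne.symm h.1, ih h.2]

theorem specSplit_append (pre suf : List Int) (sep : Int) (h : sep ∉ pre) :
    specSplit (pre ++ sep :: suf) sep = pre :: specSplit suf sep := by
  induction pre with
  | nil => simp [specSplit]
  | cons e pre' ih =>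
    simp only [List.mem_cons, not_or] at h
    simp [specSplit, Ne.symm h.1, ih h.2]

theorem splitAllB_eq (rest : List Int) (sep : Int) (segs : List (List Int)) :
    splitAllB rest sep segs = segs ++ specSplit rest sep := by
  induction hL : rest.length using Nat.strong_induction_on generalizing rest segs with
  | _ L ih =>
  rw [splitAllB]
  split
  · next h =>
    rw [PySem.List.index?_eq_none_iff] at h
    rw [specSplit_not_mem rest sep h]
  · next i h =>
    obtain ⟨pre, suf, hrest, hlen, hmem⟩ := (PySem.List.index?_eq_some_iff rest sep i).mp h
    have hc : ((i : Int) + 1) = (((i + 1 : Nat)) : Int) := by push_cast; ring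
    have hdrop : PySem.List.slice rest (some ((i : Int) + 1)) none = suf := by
      rw [hc, PySem.List.slice_from_natCast, hrest, ← hlen]
      simp
    have htake : PySem.List.slice rest none (some ((i : Int))) = pre := by
      rw [PySem.List.slice_to_natCast, hrest, ← hlen]
      simp
    rw [hdrop, htake]
    rw [ih suf.length (by rw [← hL, hrest]; simp; omega) suf (segs ++ [pre]) rfl]
    rw [hrest, specSplit_append pre suf sep hmem]
    simp

theorem splitNLoop_eq (ls : List (List Int)) (n counter : Int) (out : List (List Int))
    (hc : 0 ≤ counter) (hn : 0 < n → counter < n) :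
    splitNLoop ls n counter out =
      out ++ (if n ≤ 0 then ls
              else ls.take (n - counter).toNat ++ List.replicate ((n - counter) - ls.length).toNat ([] : List Int)) := by
  induction ls generalizing counter out with
  | nil =>
    simp only [splitNLoop]
    by_cases hn0 : n ≤ 0
    · rw [if_neg (by omega), if_pos hn0]
      simp
    · rw [if_pos ⟨by omega, hn (by omega)⟩, if_neg hn0]
      simp only [List.take_nil, List.length_nil, Nat.cast_zero, List.nil_append]
      have : n - counter - 0 = n - counter := by ring
      rw [this]
  | cons l rest ih =>
    simp only [splitNLoop]
    by_cases h1 : counter + 1 = n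
    · rw [if_pos h1, if_neg (by omega : ¬ n ≤ 0)]
      have ht : (n - counter).toNat = 1 := by omega
      have hr : (n - counter - ((l :: rest).length : Int)).toNat = 0 := by
        have hL : ((l :: rest).length : Int) = (rest.length : Int) + 1 := by simp
        omega
      rw [ht, hr]
      simp
    · rw [if_neg h1]
      rw [ih (counter + 1) (out ++ [l]) (by omega) (fun hpos => by have := hn hpos; omega)]
      by_cases hn0 : n ≤ 0
      · rw [if_pos hn0, if_pos hn0]
        simp
      · rw [if_neg hn0, if_neg hn0]
        have hcn : counter < n := hn (by omega)
        have ht : (n - counter).toNat = (n - (counter + 1)).toNat + 1 := by omega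
        have hr : (n - counter - ((l :: rest).length : Int)).toNat
            = (n - (counter + 1) - (rest.length : Int)).toNat := by
          have hL : ((l :: rest).length : Int) = (rest.length : Int) + 1 := by simp
          omega
        rw [ht, hr]
        simp [List.take_succ_cons]

-- ===== VERDICT (by name: the statement is the Claim_ definition above) =====
theorem split_n_spec : Claim_equal_split_n := by
  intro lst sep n _
  unfold Spec_split_n split_n split_n_alt
  rw [splitAllB_eq, List.nil_append]
  have hg : pySplitGo lst sep [] [] = specSplit lst sep := by
    rw [pySplitGo_eq]
    cases h : specSplit lst sep with
    | nil => exact absurd h (specSplit_ne_nil lst sep)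
    | cons a t => simp
  rw [hg, splitNLoop_eq _ _ _ _ le_rfl (fun _ => ‹_›)]
  by_cases hn : n ≤ 0
  · simp [hn]
  · have h0 : ¬ (n ≤ 0) := hn
    simp only [h0, if_false, List.nil_append]
    rw [PySem.List.slice_to (specSplit lst sep) (by omega : (0:Int) ≤ n)]
    simp
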